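-- pv_equiv track=rewrite | github.com/zblcm/diffusion-learn | src/model.py | _zigzag_order
-- ===== SOURCE A (Python) =====
-- def _zigzag_order(h, w):
--     """生成 h x w 网格的 zigzag 遍历顺序."""
--     order = []
--     for i in range(h):
--         if i % 2 == 0:
--             for j in range(w):
--                 order.append(i * w + j)
--         else:
--             for j in range(w - 1, -1, -1):
--                 order.append(i * w + j)
--     return order
-- ===== SOURCE B (Python) =====
-- def _zigzag_order(h, w):
--     if w <= 0:
--         return []
--     order = list(range(h * w))
--     for i in range(1, h, 2):
--         order[i * w:(i + 1) * w] = order[i * w:(i + 1) * w][::-1]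
--     return order
-- ===== Notes on version B (the rewrite author's own statement) =====
-- stated objective: alternative
-- what changed: B materialises the row-major identity list in one bulk pass (list(range(h*w))) and then reverses each odd row's slice in a stride-2 second pass, instead of A's nested per-row loops appending one element at a time with a parity branch inside.
import Mathlib
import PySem

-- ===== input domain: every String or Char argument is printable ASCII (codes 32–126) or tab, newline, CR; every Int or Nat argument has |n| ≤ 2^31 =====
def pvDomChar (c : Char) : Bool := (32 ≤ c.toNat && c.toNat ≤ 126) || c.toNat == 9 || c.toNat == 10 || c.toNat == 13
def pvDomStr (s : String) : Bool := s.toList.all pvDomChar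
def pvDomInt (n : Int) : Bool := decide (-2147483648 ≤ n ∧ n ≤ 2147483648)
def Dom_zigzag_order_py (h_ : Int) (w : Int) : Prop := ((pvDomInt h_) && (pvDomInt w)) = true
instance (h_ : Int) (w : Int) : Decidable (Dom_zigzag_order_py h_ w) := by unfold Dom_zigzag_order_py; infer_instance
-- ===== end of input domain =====

-- B builds the row-major identity list in one pass and then reverses each odd row's
-- slice in a stride-2 second pass, instead of A's nested per-row append loops with a
-- parity branch (same asymptotic cost; alternative decomposition).

-- ===== PORT A =====
def zigzag_order_py (h_ : Int) (w : Int) : List Int :=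
  (PySem.List.pyRange 0 h_ 1).foldl (fun order i =>
    if PySem.Int.mod i 2 = 0 then
      (PySem.List.pyRange 0 w 1).foldl (fun order j => order ++ [i * w + j]) order
    else
      (PySem.List.pyRange (w - 1) (-1) (-1)).foldl (fun order j => order ++ [i * w + j]) order) []

-- ===== PORT B =====
-- slice assignment 'order[a:b] = ys' (0 ≤ a ≤ b here) is order[:a] ++ ys ++ order[b:];
-- '[::-1]' is ported as .reverse (exact: PySem.List.slice?_none_none_neg_one).
def zigzag_order_py_alt (h_ : Int) (w : Int) : List Int :=
  if w ≤ 0 then []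
  else
    (PySem.List.pyRange 1 h_ 2).foldl (fun order i =>
      PySem.List.slice order none (some (i * w)) ++
        (PySem.List.slice order (some (i * w)) (some ((i + 1) * w))).reverse ++
        PySem.List.slice order (some ((i + 1) * w)) none)
      (PySem.List.pyRange 0 (h_ * w) 1)

-- ===== PRECONDITION & SPEC =====
def Spec_zigzag_order_py (h_ : Int) (w : Int) (out : List Int) : Prop := out = zigzag_order_py_alt h_ w
instance (h_ : Int) (w : Int) (out : List Int) : Decidable (Spec_zigzag_order_py h_ w out) := by unfold Spec_zigzag_order_py; infer_instance

-- ===== CLAIM (what is proved, stated in full; the proofs are below) =====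
def Claim_equal_zigzag_order_py : Prop := ∀ (h_ : Int) (w : Int), Dom_zigzag_order_py h_ w → Spec_zigzag_order_py h_ w (zigzag_order_py h_ w)

-- ===== LEMMAS AND PROOFS =====

-- the common characterisation: row i of the zigzag order, and the first m rows
def zigRow (w i : Int) : List Int :=
  if PySem.Int.mod i 2 = 0 then PySem.List.pyRange (i * w) ((i + 1) * w) 1
  else (PySem.List.pyRange (i * w) ((i + 1) * w) 1).reverse

def zigUpto (w m : Int) : List Int := (PySem.List.pyRange 0 m 1).flatMap (zigRow w)

theorem pyRange_two_nil (a b : Int) (h : b ≤ a) : PySem.List.pyRange a b 2 = [] := by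
  simp [PySem.List.pyRange]; omega

theorem pyRange_two_cons (a b : Int) (h : a < b) :
    PySem.List.pyRange a b 2 = a :: PySem.List.pyRange (a + 2) b 2 := by
  simp only [PySem.List.pyRange]
  norm_num [h]
  by_cases h2 : a + 2 < b
  · simp only [if_pos h2]
    have hc : ((b - a + 2 - 1) / 2).toNat = ((b - (a + 2) + 2 - 1) / 2).toNat + 1 := by omega
    rw [hc, List.range_succ_eq_map]
    simp [List.map_map, Function.comp]
    ring_nf
    simp
  · simp only [if_neg h2]
    have hc : ((b - a + 2 - 1) / 2).toNat = 1 := by omega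
    simp [hc, List.range_succ]

theorem map_add_pyRange (c w : Int) :
    (PySem.List.pyRange 0 w 1).map (fun j => c + j) = PySem.List.pyRange c (c + w) 1 := by
  rw [PySem.List.pyRange_one 0 w, PySem.List.pyRange_one c (c + w)]
  simp [List.map_map, Function.comp]

theorem zigRow_eq_even (w i : Int) (h : PySem.Int.mod i 2 = 0) :
    zigRow w i = PySem.List.pyRange (i * w) (i * w + w) 1 := by
  unfold zigRow
  rw [if_pos h, show (i + 1) * w = i * w + w from by ring]

theorem zigRow_eq_odd (w i : Int) (h : PySem.Int.mod i 2 = 1) :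
    zigRow w i = (PySem.List.pyRange (i * w) (i * w + w) 1).reverse := by
  have hne : ¬ PySem.Int.mod i 2 = 0 := by rw [h]; decide
  unfold zigRow
  rw [if_neg hne, show (i + 1) * w = i * w + w from by ring]

theorem length_zigRow (w i : Int) : (zigRow w i).length = w.toNat := by
  unfold zigRow
  rw [show (i + 1) * w = i * w + w from by ring]
  split <;> simp [PySem.List.length_pyRange_one]

theorem length_zigUpto (w m : Int) (hm : 0 ≤ m) (hw : 0 ≤ w) :
    (zigUpto w m).length = (m * w).toNat := by
  unfold zigUpto
  rw [List.length_flatMap]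
  have : (PySem.List.pyRange 0 m 1).map (fun a => (zigRow w a).length)
      = (PySem.List.pyRange 0 m 1).map (fun _ => w.toNat) := by
    apply List.map_congr_left; intro i _; exact length_zigRow w i
  rw [this, List.map_const', List.sum_replicate, smul_eq_mul,
    PySem.List.length_pyRange_one]
  have hmul : (m * w).toNat = m.toNat * w.toNat := by
    conv_lhs => rw [← Int.toNat_of_nonneg hm, ← Int.toNat_of_nonneg hw]
    rw [← Nat.cast_mul, Int.toNat_natCast]
  rw [Int.sub_zero, hmul]

theorem zigUpto_succ (w m : Int) (hm : 0 ≤ m) :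
    zigUpto w (m + 1) = zigUpto w m ++ zigRow w m := by
  unfold zigUpto
  rw [PySem.List.pyRange_one_succ_right hm, List.flatMap_append]
  simp

-- A's fold appends zigRow w i at each step
theorem foldlA_eq (w : Int) (L : List Int) (init : List Int) :
    L.foldl (fun order i =>
      if PySem.Int.mod i 2 = 0 then
        (PySem.List.pyRange 0 w 1).foldl (fun order j => order ++ [i * w + j]) order
      else
        (PySem.List.pyRange (w - 1) (-1) (-1)).foldl (fun order j => order ++ [i * w + j]) order)
      init = init ++ L.flatMap (zigRow w) := by
  induction L generalizing init with
  | nil => simp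
  | cons i L ih =>
    have hstep : (if PySem.Int.mod i 2 = 0 then
        (PySem.List.pyRange 0 w 1).foldl (fun order j => order ++ [i * w + j]) init
      else
        (PySem.List.pyRange (w - 1) (-1) (-1)).foldl (fun order j => order ++ [i * w + j]) init)
        = init ++ zigRow w i := by
      by_cases hpar : PySem.Int.mod i 2 = 0
      · rw [if_pos hpar,
          PySem.List.foldl_append_singleton_eq_map (fun j => i * w + j),
          map_add_pyRange (i * w) w, zigRow_eq_even w i hpar]
      · rw [if_neg hpar]
        have hodd : PySem.Int.mod i 2 = 1 := by
          have := PySem.Int.mod_nonneg i (b := 2) (by norm_num)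
          have := PySem.Int.mod_lt i (b := 2) (by norm_num)
          omega
        rw [PySem.List.foldl_append_singleton_eq_map (fun j => i * w + j)]
        have hr : PySem.List.pyRange (w - 1) (-1) (-1) = (PySem.List.pyRange 0 w 1).reverse := by
          rw [PySem.List.pyRange_neg_one_eq_reverse]; norm_num
        rw [hr, List.map_reverse, map_add_pyRange (i * w) w, zigRow_eq_odd w i hodd]
    rw [List.foldl_cons, hstep, ih, List.flatMap_cons, List.append_assoc]

-- B's loop invariant: processing odd rows from i upward finishes the zigzag order
theorem B_inv (h_ w : Int) (hw : 0 < w) :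
    ∀ (n : Nat) (i : Int), 1 ≤ i → PySem.Int.mod i 2 = 1 → i ≤ h_ → (h_ - i).toNat = n →
      (PySem.List.pyRange i h_ 2).foldl (fun order i =>
        PySem.List.slice order none (some (i * w)) ++
          (PySem.List.slice order (some (i * w)) (some ((i + 1) * w))).reverse ++
          PySem.List.slice order (some ((i + 1) * w)) none)
        (zigUpto w i ++ PySem.List.pyRange (i * w) (h_ * w) 1) = zigUpto w h_ := by
  intro n
  induction n using Nat.strong_induction_on with
  | _ n ih =>
    intro i hi1 hpar hih hn
    by_cases hlt : i < h_
    · -- one loop iteration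
      rw [pyRange_two_cons i h_ hlt, List.foldl_cons]
      have hiw : (0:Int) ≤ i * w := by positivity
      have hi1w : (0:Int) ≤ (i + 1) * w := by positivity
      have hlen : (zigUpto w i).length = (i * w).toNat :=
        length_zigUpto w i (by omega) (by omega)
      have hsplit : PySem.List.pyRange (i * w) (h_ * w) 1
          = PySem.List.pyRange (i * w) ((i + 1) * w) 1 ++ PySem.List.pyRange ((i + 1) * w) (h_ * w) 1 := by
        apply PySem.List.pyRange_one_append <;> nlinarith
      have hlenrow : (PySem.List.pyRange (i * w) ((i + 1) * w) 1).length = w.toNat := by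
        rw [PySem.List.length_pyRange_one, show (i + 1) * w = i * w + w from by ring]; omega
      have hstate : zigUpto w i ++ PySem.List.pyRange (i * w) (h_ * w) 1
          = (zigUpto w i ++ PySem.List.pyRange (i * w) ((i + 1) * w) 1) ++ PySem.List.pyRange ((i + 1) * w) (h_ * w) 1 := by
        rw [hsplit, List.append_assoc]
      have hlen2 : (zigUpto w i ++ PySem.List.pyRange (i * w) ((i + 1) * w) 1).length = ((i + 1) * w).toNat := by
        rw [List.length_append, hlen, hlenrow, show (i + 1) * w = i * w + w from by ring]; omega
      have hstep : PySem.List.slice (zigUpto w i ++ PySem.List.pyRange (i * w) (h_ * w) 1) none (some (i * w)) ++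
          (PySem.List.slice (zigUpto w i ++ PySem.List.pyRange (i * w) (h_ * w) 1) (some (i * w)) (some ((i + 1) * w))).reverse ++
          PySem.List.slice (zigUpto w i ++ PySem.List.pyRange (i * w) (h_ * w) 1) (some ((i + 1) * w)) none
          = zigUpto w (i + 1) ++ PySem.List.pyRange ((i + 1) * w) (h_ * w) 1 := by
        have htw : ((i + 1) * w).toNat - (i * w).toNat = w.toNat := by
          rw [show (i + 1) * w = i * w + w from by ring]; omega
        rw [PySem.List.slice_to _ hiw, PySem.List.slice_from _ hi1w,
          PySem.List.slice_toNat _ hiw hi1w, htw,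
          List.take_left' hlen, List.drop_left' hlen, hsplit,
          List.take_left' hlenrow, ← List.append_assoc, List.drop_left' hlen2,
          zigUpto_succ w i (by omega), zigRow_eq_odd w i hpar,
          show i * w + w = (i + 1) * w from by ring, List.append_assoc]
      rw [hstep]
      by_cases hend : i + 1 < h_
      · -- continue with i + 2
        have hpar2 : PySem.Int.mod (i + 2) 2 = 1 := by
          rw [PySem.Int.mod_eq_emod_of_pos (by norm_num)] at hpar ⊢; omega
        have hsplit2 : PySem.List.pyRange ((i + 1) * w) (h_ * w) 1
            = PySem.List.pyRange ((i + 1) * w) ((i + 2) * w) 1 ++ PySem.List.pyRange ((i + 2) * w) (h_ * w) 1 := by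
          apply PySem.List.pyRange_one_append <;> nlinarith
        have hpar1 : PySem.Int.mod (i + 1) 2 = 0 := by
          rw [PySem.Int.mod_eq_emod_of_pos (by norm_num)] at hpar ⊢; omega
        have h2 : zigUpto w (i + 2) = zigUpto w (i + 1) ++ zigRow w (i + 1) := by
          have h3 := zigUpto_succ w (i + 1) (by omega)
          rw [show (i : Int) + 1 + 1 = i + 2 from by ring] at h3
          exact h3
        have hstate2 : zigUpto w (i + 1) ++ PySem.List.pyRange ((i + 1) * w) (h_ * w) 1
            = zigUpto w (i + 2) ++ PySem.List.pyRange ((i + 2) * w) (h_ * w) 1 := by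
          rw [hsplit2, ← List.append_assoc, h2, zigRow_eq_even w (i + 1) hpar1,
            show (i + 1) * w + w = (i + 2) * w from by ring]
        rw [hstate2]
        exact ih (h_ - (i + 2)).toNat (by omega) (i + 2) (by omega) hpar2 (by omega) rfl
      · -- i + 1 = h_ : loop ends
        have hh : h_ = i + 1 := by omega
        rw [pyRange_two_nil (i + 2) h_ (by omega), List.foldl_nil, hh,
          PySem.List.pyRange_one_eq_nil (by nlinarith), List.append_nil]
    · -- i = h_ : empty loop
      have : i = h_ := by omega
      subst this
      rw [pyRange_two_nil i i (by omega), List.foldl_nil,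
        PySem.List.pyRange_one_eq_nil (le_refl _), List.append_nil]

theorem A_eq_zigUpto (h_ w : Int) : zigzag_order_py h_ w = zigUpto w h_ := by
  unfold zigzag_order_py zigUpto
  rw [foldlA_eq]
  simp

theorem B_eq_zigUpto (h_ w : Int) : zigzag_order_py_alt h_ w = zigUpto w h_ := by
  unfold zigzag_order_py_alt
  by_cases hw : w ≤ 0
  · rw [if_pos hw]
    unfold zigUpto
    symm
    rw [List.flatMap_eq_nil_iff]
    intro i hi
    rw [PySem.List.mem_pyRange_one] at hi
    unfold zigRow
    have : PySem.List.pyRange (i * w) ((i + 1) * w) 1 = [] := by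
      apply PySem.List.pyRange_one_eq_nil; nlinarith
    split <;> simp [this]
  · rw [if_neg hw]
    have hw' : 0 < w := by omega
    by_cases hh : h_ ≤ 0
    · rw [pyRange_two_nil 1 h_ (by omega), List.foldl_nil,
        PySem.List.pyRange_one_eq_nil (by nlinarith)]
      symm
      simp [zigUpto, PySem.List.pyRange_one_eq_nil (show h_ ≤ 0 from hh)]
    · have h1 : (1:Int) ≤ h_ := by omega
      have hinit : PySem.List.pyRange 0 (h_ * w) 1
          = zigUpto w 1 ++ PySem.List.pyRange (1 * w) (h_ * w) 1 := by
        have hz : zigUpto w 1 = PySem.List.pyRange 0 w 1 := by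
          have : zigUpto w 1 = zigUpto w 0 ++ zigRow w 0 := by
            have := zigUpto_succ w 0 (le_refl 0); simpa using this
          rw [this, zigRow_eq_even w 0 (by decide)]
          simp [zigUpto, PySem.List.pyRange_one_eq_nil (le_refl (0:Int))]
        rw [hz, one_mul]
        apply PySem.List.pyRange_one_append <;> nlinarith
      rw [hinit]
      exact B_inv h_ w hw' (h_ - 1).toNat 1 (le_refl 1) (by decide) h1 rfl

-- ===== VERDICT (by name: the statement is the Claim_ definition above) =====
theorem zigzag_order_py_spec : Claim_equal_zigzag_order_py := by
  intro h_ w _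
  unfold Spec_zigzag_order_py
  rw [A_eq_zigUpto, B_eq_zigUpto]
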